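-- pv_equiv track=rewrite | github.com/annaritz/pathway-connectivity | src/hypergraph_code/b-relaxation-pathways.py | dist2hist
-- ===== SOURCE A (Python) =====
-- def dist2hist(dist_dict):
-- 	## get histogram of distances.
-- 	h = {} # distance: # of nodes
-- 	for n,val in dist_dict.items():
-- 		if val == None: # skip 'None' type (these are infinity)
-- 			continue
-- 		if val not in h:
-- 			h[val] = set()
-- 		h[val].add(n)
-- 	return h
-- ===== SOURCE B (Python) =====
-- def dist2hist(dist_dict):
--     ## Two-phase: first collect the distinct finite distances in first-seen
--     ## order, then build each distance's node set by filtering the items.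
--     vals = []
--     for val in dist_dict.values():
--         if val is not None and val not in vals:
--             vals.append(val)
--     return {v: {n for n, val in dist_dict.items() if val == v} for v in vals}
-- ===== Notes on version B (the rewrite author's own statement) =====
-- stated objective: alternative
-- what changed: Replaces A's single incremental pass that inserts each node into a dict of sets with a two-phase decomposition: first collect the distinct non-None distance values in first-seen order, then build each value's node set by one filtering comprehension over the items.
import Mathlib
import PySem

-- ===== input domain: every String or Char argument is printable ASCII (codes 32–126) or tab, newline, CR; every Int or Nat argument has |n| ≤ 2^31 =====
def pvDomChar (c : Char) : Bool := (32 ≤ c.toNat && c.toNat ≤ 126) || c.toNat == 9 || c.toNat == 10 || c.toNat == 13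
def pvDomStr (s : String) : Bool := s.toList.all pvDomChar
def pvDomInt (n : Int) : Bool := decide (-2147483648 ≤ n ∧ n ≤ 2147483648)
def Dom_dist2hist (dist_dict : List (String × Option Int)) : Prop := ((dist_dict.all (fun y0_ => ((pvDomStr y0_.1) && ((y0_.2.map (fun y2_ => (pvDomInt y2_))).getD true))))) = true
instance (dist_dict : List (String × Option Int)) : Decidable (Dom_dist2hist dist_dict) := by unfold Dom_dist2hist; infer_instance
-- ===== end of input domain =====

-- B groups by a two-phase pass (distinct values first, then one filter per value) instead of
-- A's incremental per-item dict-of-sets insertion; objective: alternative decomposition, not speed.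

-- ===== PORT A =====
-- one iteration of A's loop body: skip None, ensure the key exists, add the node to its set
def distStepA (h : PySem.Dict Int (PySem.Set String)) (p : String × Option Int) :
    PySem.Dict Int (PySem.Set String) :=
  match p.2 with
  | none => h
  | some v =>
    let h1 := if h.contains v then h else h.insert v PySem.Set.empty
    h1.modify v PySem.Set.empty (fun s => PySem.Set.add s p.1)

def dist2hist (dist_dict : List (String × Option Int)) : List (Int × List String) :=
  (dist_dict.foldl distStepA PySem.Dict.empty).items

-- ===== PORT B =====
-- B's first phase: the distinct non-None values in first-seen order
def distValsB (dist_dict : List (String × Option Int)) : List Int :=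
  dist_dict.foldl (fun vs p =>
    match p.2 with
    | none => vs
    | some v => if vs.contains v then vs else vs ++ [v]) []

def dist2hist_alt (dist_dict : List (String × Option Int)) : List (Int × List String) :=
  (distValsB dist_dict).map (fun v =>
    (v, PySem.Set.ofList ((dist_dict.filter (fun p => p.2 == some v)).map (·.1))))

-- ===== PRECONDITION & SPEC =====
def Spec_dist2hist (dist_dict : List (String × Option Int)) (out : List (Int × List String)) : Prop := out = dist2hist_alt dist_dict
instance (dist_dict : List (String × Option Int)) (out : List (Int × List String)) : Decidable (Spec_dist2hist dist_dict out) := by unfold Spec_dist2hist; infer_instance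

-- ===== CLAIM (what is proved, stated in full; the proofs are below) =====
def Claim_equal_dist2hist : Prop := ∀ (dist_dict : List (String × Option Int)), Dom_dist2hist dist_dict → Spec_dist2hist dist_dict (dist2hist dist_dict)

-- ===== LEMMAS AND PROOFS =====


-- A's accumulated set at key v is what B's filter produces (generalised over the accumulator)
theorem getD_foldl_distStepA (dd : List (String × Option Int))
    (h : PySem.Dict Int (PySem.Set String)) (v : Int) :
    (dd.foldl distStepA h).getD v PySem.Set.empty
      = PySem.Set.update (h.getD v PySem.Set.empty)
          ((dd.filter (fun p => p.2 == some v)).map (·.1)) := by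
  induction dd generalizing h with
  | nil => simp [PySem.Set.update_nil]
  | cons p dd ih =>
    obtain ⟨n, w⟩ := p
    cases w with
    | none => simpa [distStepA] using ih h
    | some u =>
      have hstep : (distStepA h (n, some u)).getD v PySem.Set.empty
          = if v = u then PySem.Set.add (h.getD v PySem.Set.empty) n
            else h.getD v PySem.Set.empty := by
        by_cases hvu : v = u
        · subst hvu
          by_cases hc : h.contains v
          · simp [distStepA, hc]
          · have h0 := PySem.Dict.getD_of_not_contains h
              (k := v) PySem.Set.empty (by simpa using hc)
            simp only [PySem.Set.empty] at h0
            simp [distStepA, hc, h0, PySem.Set.add]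
        · by_cases hc : h.contains u
          · simp [distStepA, hc, PySem.Dict.getD_modify, hvu]
          · simp [distStepA, hc, PySem.Dict.getD_modify, PySem.Dict.getD_insert, hvu]
      by_cases hvu : v = u
      · subst hvu
        simp only [List.foldl_cons]
        rw [ih, hstep]
        simp [PySem.Set.update_cons]
      · have hne : ((some u : Option Int) == some v) = false := by
          simp [Ne.symm hvu]
        simp only [List.foldl_cons]
        rw [ih, hstep]
        simp [hvu, hne]

-- A's key list evolves exactly like B's distinct-value list (generalised over the accumulator)
theorem keys_foldl_distStepA (dd : List (String × Option Int))
    (h : PySem.Dict Int (PySem.Set String)) :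
    (dd.foldl distStepA h).keys
      = dd.foldl (fun vs p =>
          match p.2 with
          | none => vs
          | some v => if vs.contains v then vs else vs ++ [v]) h.keys := by
  induction dd generalizing h with
  | nil => rfl
  | cons p dd ih =>
    obtain ⟨n, w⟩ := p
    cases w with
    | none => simpa [distStepA] using ih h
    | some u =>
      have hmem : h.keys.contains u = h.contains u := by
        rw [PySem.Dict.contains_eq_decide_mem_keys]
        simp
      have hkeys : (distStepA h (n, some u)).keys
          = if h.keys.contains u then h.keys else h.keys ++ [u] := by
        by_cases hc : h.contains u
        · have : (distStepA h (n, some u)).keys = (h.insert u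
              (PySem.Set.add (h.getD u PySem.Set.empty) n)).keys := by
            simp [distStepA, hc, PySem.Dict.keys_modify]
          rw [this, PySem.Dict.keys_insert_of_contains _ _ hc, hmem, if_pos hc]
        · have hc' : h.contains u = false := by simpa using hc
          have : (distStepA h (n, some u)).keys
              = ((h.insert u PySem.Set.empty).insert u
                  (PySem.Set.add ((h.insert u PySem.Set.empty).getD u PySem.Set.empty) n)).keys := by
            simp [distStepA, hc, PySem.Dict.keys_modify]
          rw [this, PySem.Dict.keys_insert_of_contains _ _ (by
              simp [PySem.Dict.contains_insert_self]),
            PySem.Dict.keys_insert_of_not_contains _ _ hc', hmem, hc']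
          simp
      simp only [List.foldl_cons]
      rw [ih, hkeys]

-- B's first phase never repeats a value
theorem nodup_distVals_fold (dd : List (String × Option Int)) (vs : List Int)
    (hnd : vs.Nodup) :
    (dd.foldl (fun vs p =>
        match p.2 with
        | none => vs
        | some v => if vs.contains v then vs else vs ++ [v]) vs).Nodup := by
  induction dd generalizing vs with
  | nil => exact hnd
  | cons p dd ih =>
    obtain ⟨n, w⟩ := p
    cases w with
    | none => exact ih vs hnd
    | some u =>
      simp only [List.foldl_cons]
      by_cases hc : u ∈ vs
      · rw [if_pos (by simpa using hc)]
        exact ih vs hnd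
      · rw [if_neg (by simpa using hc)]
        refine ih (vs ++ [u]) ?_
        refine List.Nodup.append hnd (List.nodup_singleton u) ?_
        intro a ha hb
        simp only [List.mem_singleton] at hb
        exact hc (hb ▸ ha)

-- ===== VERDICT (by name: the statement is the Claim_ definition above) =====
theorem dist2hist_spec : Claim_equal_dist2hist := by
  intro dd _
  unfold Spec_dist2hist dist2hist dist2hist_alt
  have hkeys : (dd.foldl distStepA PySem.Dict.empty).keys = distValsB dd := by
    have := keys_foldl_distStepA dd PySem.Dict.empty
    simpa [distValsB, PySem.Dict.keys_empty] using this
  have hnd : (dd.foldl distStepA PySem.Dict.empty).keys.Nodup := by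
    rw [hkeys]
    exact nodup_distVals_fold dd [] List.nodup_nil
  rw [PySem.Dict.items_eq_map_keys _ hnd PySem.Set.empty, hkeys]
  apply List.map_congr_left
  intro v _
  have := getD_foldl_distStepA dd PySem.Dict.empty v
  rw [this, PySem.Dict.getD_empty, PySem.Set.update_empty]
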